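-- pv_equiv track=rewrite | github.com/duoduo666/mido-Barock | ai创曲+人工智能作品+13+隋顺意/AI创曲.py | getlu
-- ===== SOURCE A (Python) =====
-- def getlu(first,second,ind):
--     s = 0
--     c = 0
--     for i in range(1,len(second)):
--         if second[i] != second[s]:
--             c += 1
--             if c == ind:
--                 return first[s:i]
--             else:
--                 s = i
--     return first[s:]
-- ===== SOURCE B (Python) =====
-- def getlu(first, second, ind):
--     # Table-based: precompute all value-change boundary indices, then select by indexing.
--     bounds = [i for i in range(1, len(second)) if second[i] != second[i - 1]]
--     if 1 <= ind <= len(bounds):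
--         lo = bounds[ind - 2] if 2 <= ind else 0
--         return first[lo:bounds[ind - 1]]
--     if bounds:
--         return first[bounds[-1]:]
--     return first[:]
-- ===== Notes on version B (the rewrite author's own statement) =====
-- stated objective: alternative
-- what changed: Replaces the single stateful early-exit scan (tracking run start s and change counter c) by precomputing the list of all change-boundary indices and selecting the slice bounds by direct indexing into that table.
import Mathlib
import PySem

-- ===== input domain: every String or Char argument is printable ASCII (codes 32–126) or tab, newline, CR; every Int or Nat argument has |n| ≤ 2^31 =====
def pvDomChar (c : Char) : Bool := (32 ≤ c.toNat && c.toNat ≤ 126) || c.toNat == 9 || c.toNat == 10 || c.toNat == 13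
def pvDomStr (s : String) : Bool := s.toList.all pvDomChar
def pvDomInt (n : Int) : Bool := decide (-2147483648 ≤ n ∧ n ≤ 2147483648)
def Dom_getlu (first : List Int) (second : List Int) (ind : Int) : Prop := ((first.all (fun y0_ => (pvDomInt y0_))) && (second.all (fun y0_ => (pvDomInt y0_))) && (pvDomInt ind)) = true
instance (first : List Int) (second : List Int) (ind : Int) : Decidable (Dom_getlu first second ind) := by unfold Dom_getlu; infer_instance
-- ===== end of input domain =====

-- B replaces A's stateful early-exit scan by a precomputed table of change boundaries plus direct indexing (alternative decomposition, same O(n) cost).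

-- ===== PORT A =====
-- the for-loop with early return; state (s, c); indices are always in range, so pyGetD is exact
def getluLoop (first second : List Int) (ind : Int) : List Int → Int → Int → List Int
  | [], s, _ => PySem.List.slice first (some s) none
  | i :: rest, s, c =>
    if PySem.List.pyGetD second i 0 ≠ PySem.List.pyGetD second s 0 then
      (if c + 1 = ind then PySem.List.slice first (some s) (some i)
       else getluLoop first second ind rest i (c + 1))
    else getluLoop first second ind rest s c

def getlu (first : List Int) (second : List Int) (ind : Int) : List Int :=
  getluLoop first second ind (PySem.List.pyRange 1 (second.length : Int) 1) 0 0

-- ===== PORT B =====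
-- bounds = [i for i in range(1,len(second)) if second[i] != second[i-1]]; indices into bounds are in range where used, so pyGetD is exact
def getlu_alt (first : List Int) (second : List Int) (ind : Int) : List Int :=
  let bounds := (PySem.List.pyRange 1 (second.length : Int) 1).filter
      (fun i => PySem.List.pyGetD second i 0 != PySem.List.pyGetD second (i - 1) 0)
  if 1 ≤ ind ∧ ind ≤ (bounds.length : Int) then
    let lo : Int := if 2 ≤ ind then PySem.List.pyGetD bounds (ind - 2) 0 else 0
    PySem.List.slice first (some lo) (some (PySem.List.pyGetD bounds (ind - 1) 0))
  else if bounds ≠ [] then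
    PySem.List.slice first (some (PySem.List.pyGetD bounds (-1) 0)) none
  else
    first

-- ===== PRECONDITION & SPEC =====
def Spec_getlu (first : List Int) (second : List Int) (ind : Int) (out : List Int) : Prop := out = getlu_alt first second ind
instance (first : List Int) (second : List Int) (ind : Int) (out : List Int) : Decidable (Spec_getlu first second ind out) := by unfold Spec_getlu; infer_instance

-- ===== CLAIM (what is proved, stated in full; the proofs are below) =====
def Claim_equal_getlu : Prop := ∀ (first : List Int) (second : List Int) (ind : Int), Dom_getlu first second ind → Spec_getlu first second ind (getlu first second ind)

-- ===== LEMMAS AND PROOFS =====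

-- reference recursion: what A's loop computes from the remaining change boundaries
def Floop (first : List Int) (ind : Int) : List Int → Int → Int → List Int
  | [], s, _ => PySem.List.slice first (some s) none
  | b :: bs, s, c =>
    if c + 1 = ind then PySem.List.slice first (some s) (some b)
    else Floop first ind bs b (c + 1)

lemma pyGetD_cons_pos (b : Int) (bs : List Int) (i : Int) (h : 1 ≤ i) :
    PySem.List.pyGetD (b :: bs) i 0 = PySem.List.pyGetD bs (i - 1) 0 := by
  simp only [PySem.List.pyGetD, PySem.List.pyGet?, PySem.List.pyIdx?, List.length_cons]
  split_ifs with h1 h2 h3 h4 h5 h6 h7 <;> push_cast at * <;> try omega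
  · have hi : i.toNat = (i.toNat - 1) + 1 := by omega
    rw [hi]; simp [Option.bind]
  all_goals simp [Option.bind]

lemma pyGetD_neg_one_cons (b : Int) (bs : List Int) (h : bs ≠ []) :
    PySem.List.pyGetD (b :: bs) (-1) 0 = PySem.List.pyGetD bs (-1) 0 := by
  have h1 := PySem.List.pyGetD_neg_one (xs := b :: bs) (d := (0:Int)) (by simp)
  have h2 := PySem.List.pyGetD_neg_one (xs := bs) (d := (0:Int)) h
  rw [h1, h2, List.getLast_cons h]

lemma Floop_char (first : List Int) (ind : Int) (bs : List Int) :
    ∀ (s c : Int),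
      Floop first ind bs s c =
        if c + 1 ≤ ind ∧ ind ≤ c + (bs.length : Int) then
          PySem.List.slice first
            (some (if c + 2 ≤ ind then PySem.List.pyGetD bs (ind - c - 2) 0 else s))
            (some (PySem.List.pyGetD bs (ind - c - 1) 0))
        else if bs ≠ [] then
          PySem.List.slice first (some (PySem.List.pyGetD bs (-1) 0)) none
        else
          PySem.List.slice first (some s) none := by
  induction bs with
  | nil =>
    intro s c
    simp only [Floop, List.length_nil]
    rw [if_neg (by push_cast; omega), if_neg (by simp)]
  | cons b bs ih =>
    intro s c
    simp only [Floop, List.length_cons]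
    by_cases h : c + 1 = ind
    · rw [if_pos h,
        if_pos (show c + 1 ≤ ind ∧ ind ≤ c + ((bs.length + 1 : Nat) : Int) from
          ⟨by omega, by push_cast; omega⟩),
        if_neg (show ¬ c + 2 ≤ ind from by omega)]
      rw [show ind - c - 1 = 0 from by omega, PySem.List.pyGetD_zero_cons]
    · rw [if_neg h, ih b (c + 1)]
      simp only [show c + 1 + 1 = c + 2 from by ring, show c + 1 + 2 = c + 3 from by ring,
        show ind - (c + 1) - 2 = ind - c - 3 from by ring,
        show ind - (c + 1) - 1 = ind - c - 2 from by ring]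
      by_cases hcond : c + 2 ≤ ind ∧ ind ≤ c + 1 + (bs.length : Int)
      · rw [if_pos hcond,
          if_pos (show c + 1 ≤ ind ∧ ind ≤ c + ((bs.length + 1 : Nat) : Int) from
            ⟨by omega, by push_cast at hcond ⊢; omega⟩),
          if_pos hcond.1,
          pyGetD_cons_pos b bs (ind - c - 1) (by omega),
          show ind - c - 1 - 1 = ind - c - 2 from by ring]
        by_cases h3 : c + 3 ≤ ind
        · rw [if_pos h3, pyGetD_cons_pos b bs (ind - c - 2) (by omega),
            show ind - c - 2 - 1 = ind - c - 3 from by ring]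
        · rw [if_neg h3, show ind - c - 2 = 0 from by omega, PySem.List.pyGetD_zero_cons]
      · rw [if_neg hcond,
          if_neg (show ¬ (c + 1 ≤ ind ∧ ind ≤ c + ((bs.length + 1 : Nat) : Int)) from by
            push_cast at hcond ⊢; omega)]
        cases bs with
        | nil =>
          rw [if_neg (by simp), if_pos (by simp)]
          rw [PySem.List.pyGetD_neg_one (xs := [b]) (d := (0:Int)) (by simp)]
          rfl
        | cons b2 bs2 =>
          rw [if_pos (by simp), if_pos (by simp),
            pyGetD_neg_one_cons b (b2 :: bs2) (by simp)]

lemma loop_eq (first second : List Int) (ind : Int) :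
    ∀ (m : Nat) (j s c : Int),
      ((second.length : Int) - j).toNat ≤ m → s < j →
      (∀ k : Int, s ≤ k → k < j →
        PySem.List.pyGetD second k 0 = PySem.List.pyGetD second s 0) →
      getluLoop first second ind (PySem.List.pyRange j (second.length : Int) 1) s c =
        Floop first ind
          ((PySem.List.pyRange j (second.length : Int) 1).filter
            (fun i => PySem.List.pyGetD second i 0 != PySem.List.pyGetD second (i - 1) 0))
          s c := by
  intro m
  induction m with
  | zero =>
    intro j s c hm hsj hinv
    have hj : (second.length : Int) ≤ j := by omega
    rw [PySem.List.pyRange_one_eq_nil hj]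
    simp only [List.filter_nil]
    rfl
  | succ m ih =>
    intro j s c hm hsj hinv
    by_cases hj : (second.length : Int) ≤ j
    · rw [PySem.List.pyRange_one_eq_nil hj]
      simp only [List.filter_nil]
      rfl
    · have hlt : j < (second.length : Int) := by omega
      rw [PySem.List.pyRange_one_cons hlt]
      have hprev : PySem.List.pyGetD second (j - 1) 0 = PySem.List.pyGetD second s 0 :=
        hinv (j - 1) (by omega) (by omega)
      simp only [getluLoop, List.filter_cons, hprev]
      by_cases hc : PySem.List.pyGetD second j 0 = PySem.List.pyGetD second s 0
      · rw [if_neg (by simpa using hc)]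
        simp only [hc, bne_self_eq_false, Bool.false_eq_true, if_false]
        exact ih (j + 1) s c (by omega) (by omega)
          (fun k hk1 hk2 => by
            by_cases hkj : k < j
            · exact hinv k hk1 hkj
            · have : k = j := by omega
              rw [this]; exact hc)
      · rw [if_pos hc]
        have hb : (PySem.List.pyGetD second j 0 != PySem.List.pyGetD second s 0) = true := by
          simpa using hc
        rw [hb, if_pos rfl]
        simp only [Floop]
        by_cases hi : c + 1 = ind
        · rw [if_pos hi, if_pos hi]
        · rw [if_neg hi, if_neg hi]
          exact ih (j + 1) j (c + 1) (by omega) (by omega)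
            (fun k hk1 hk2 => by
              have : k = j := by omega
              rw [this])

-- ===== VERDICT (by name: the statement is the Claim_ definition above) =====
theorem getlu_spec : Claim_equal_getlu := by
  intro first second ind _
  unfold Spec_getlu getlu getlu_alt
  rw [loop_eq first second ind ((second.length : Int) - 1).toNat 1 0 0 (by omega) (by omega)
      (fun k hk1 hk2 => by rw [show k = 0 from by omega]),
    Floop_char]
  simp only [zero_add, show ind - 0 - 2 = ind - 2 from by ring,
    show ind - 0 - 1 = ind - 1 from by ring,
    PySem.List.slice_zero_start, PySem.List.slice_none_none]
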